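-- pv_equiv track=rewrite | github.com/parascoding/alpharag | src/news_sentiment.py | _find_relevant_symbols
-- ===== SOURCE A (Python) =====
-- from typing import List, Dict, Optional
--
-- def _find_relevant_symbols(article: Dict, symbols: List[str],
--                           company_keywords: Dict[str, List[str]]) -> List[str]:
--     relevant_symbols = []
--
--     # Combine title and summary for keyword search
--     text = f"{article.get('title', '')} {article.get('summary', '')}".lower()
--
--     for symbol, keywords in company_keywords.items():
--         for keyword in keywords:
--             if keyword.lower() in text:
--                 relevant_symbols.append(symbol)
--                 break
--
--     return relevant_symbols
-- ===== SOURCE B (Python) =====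
-- def _find_relevant_symbols(article, symbols, company_keywords):
--     text = f"{article.get('title', '')} {article.get('summary', '')}".lower()
--     # substring-test each DISTINCT lowered keyword exactly once, then answer
--     # every company by set membership
--     distinct = set()
--     for keywords in company_keywords.values():
--         for kw in keywords:
--             distinct.add(kw.lower())
--     matched = {k for k in distinct if k in text}
--     return [symbol for symbol, keywords in company_keywords.items()
--             if any(kw.lower() in matched for kw in keywords)]
-- ===== Notes on version B (the rewrite author's own statement) =====
-- stated objective: alternative
-- what changed: Instead of substring-testing every keyword per company with an early-break loop, B first collects the distinct lowered keywords across all companies, substring-tests each distinct keyword once into a matched set, then emits symbols whose keyword list hits that set.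
import Mathlib
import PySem

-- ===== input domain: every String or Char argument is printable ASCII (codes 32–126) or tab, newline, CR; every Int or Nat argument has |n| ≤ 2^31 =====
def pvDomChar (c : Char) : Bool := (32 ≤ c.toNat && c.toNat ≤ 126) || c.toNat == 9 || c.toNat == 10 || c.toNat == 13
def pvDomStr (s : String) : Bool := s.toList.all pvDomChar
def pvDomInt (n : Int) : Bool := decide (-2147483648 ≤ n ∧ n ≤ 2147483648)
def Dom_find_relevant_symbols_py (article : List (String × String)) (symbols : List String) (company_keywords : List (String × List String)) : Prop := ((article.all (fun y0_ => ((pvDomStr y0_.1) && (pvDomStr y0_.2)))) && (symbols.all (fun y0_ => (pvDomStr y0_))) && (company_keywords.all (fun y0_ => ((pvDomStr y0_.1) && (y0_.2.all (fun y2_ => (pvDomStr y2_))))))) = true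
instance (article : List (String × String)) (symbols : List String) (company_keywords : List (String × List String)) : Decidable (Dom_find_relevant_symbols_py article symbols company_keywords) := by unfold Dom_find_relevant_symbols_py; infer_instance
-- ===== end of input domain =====

-- B replaces A's per-company early-break keyword scan by one pass that substring-tests
-- each distinct lowered keyword once into a matched set; alternative decomposition, same results.

-- ===== PORT A =====
-- inner 'for keyword in keywords: if keyword.lower() in text: append; break'
def pvBreakLoop (text : String) : List String → Bool
  | [] => false
  | kw :: rest => if PySem.Str.isIn (PySem.Str.lower kw) text then true else pvBreakLoop text rest

def find_relevant_symbols_py (article : List (String × String)) (symbols : List String) (company_keywords : List (String × List String)) : List String :=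
  let text := PySem.Str.lower (PySem.Dict.getD (PySem.Dict.mk article) "title" "" ++ " " ++ PySem.Dict.getD (PySem.Dict.mk article) "summary" "")
  company_keywords.foldl (fun acc p => if pvBreakLoop text p.2 then acc ++ [p.1] else acc) []

-- ===== PORT B =====
def find_relevant_symbols_py_alt (article : List (String × String)) (symbols : List String) (company_keywords : List (String × List String)) : List String :=
  let text := PySem.Str.lower (PySem.Dict.getD (PySem.Dict.mk article) "title" "" ++ " " ++ PySem.Dict.getD (PySem.Dict.mk article) "summary" "")
  let distinct : PySem.Set String := company_keywords.foldl (fun s p => p.2.foldl (fun s kw => PySem.Set.add s (PySem.Str.lower kw)) s) PySem.Set.empty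
  let matched : PySem.Set String := distinct.filter (fun k => PySem.Str.isIn k text)
  (company_keywords.filter (fun p => p.2.any (fun kw => PySem.Set.contains matched (PySem.Str.lower kw)))).map (fun p => p.1)

-- ===== PRECONDITION & SPEC =====
def Spec_find_relevant_symbols_py (article : List (String × String)) (symbols : List String) (company_keywords : List (String × List String)) (out : List String) : Prop := out = find_relevant_symbols_py_alt article symbols company_keywords
instance (article : List (String × String)) (symbols : List String) (company_keywords : List (String × List String)) (out : List String) : Decidable (Spec_find_relevant_symbols_py article symbols company_keywords out) := by unfold Spec_find_relevant_symbols_py; infer_instance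

-- ===== CLAIM (what is proved, stated in full; the proofs are below) =====
def Claim_equal_find_relevant_symbols_py : Prop := ∀ (article : List (String × String)) (symbols : List String) (company_keywords : List (String × List String)), Dom_find_relevant_symbols_py article symbols company_keywords → Spec_find_relevant_symbols_py article symbols company_keywords (find_relevant_symbols_py article symbols company_keywords)

-- ===== LEMMAS AND PROOFS =====

-- A's early-break inner loop answers exactly 'some keyword (lowered) occurs in text'
theorem pvBreakLoop_eq_any (text : String) (kws : List String) :
    pvBreakLoop text kws = kws.any (fun kw => PySem.Str.isIn (PySem.Str.lower kw) text) := by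
  induction kws with
  | nil => rfl
  | cons kw rest ih =>
      simp only [pvBreakLoop, ih, List.any_cons]
      cases h : PySem.Str.isIn (PySem.Str.lower kw) text <;> simp

-- membership in B's distinct-keyword set
theorem pvMem_distinct (ck : List (String × List String)) (s : PySem.Set String) (y : String) :
    y ∈ ck.foldl (fun s p => p.2.foldl (fun s kw => PySem.Set.add s (PySem.Str.lower kw)) s) s ↔
      y ∈ s ∨ ∃ p ∈ ck, ∃ kw ∈ p.2, y = PySem.Str.lower kw := by
  induction ck generalizing s with
  | nil => simp
  | cons hd tl ih =>
      simp only [List.foldl_cons, ih, PySem.Set.mem_foldl_add, List.mem_cons]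
      constructor
      · rintro (⟨h | ⟨b, hb, hy⟩⟩ | ⟨p, hp, h⟩)
        · exact Or.inl h
        · exact Or.inr ⟨hd, Or.inl rfl, b, hb, hy⟩
        · exact Or.inr ⟨p, Or.inr hp, h⟩
      · rintro (h | ⟨p, hp | hp, h⟩)
        · exact Or.inl (Or.inl h)
        · exact Or.inl (Or.inr (by subst hp; exact h))
        · exact Or.inr ⟨p, hp, h⟩

-- the two passes agree for any text
theorem pvMain (text : String) (ck : List (String × List String)) :
    ck.foldl (fun acc p => if pvBreakLoop text p.2 then acc ++ [p.1] else acc) [] =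
      ((ck.filter (fun p => p.2.any (fun kw =>
          PySem.Set.contains
            ((ck.foldl (fun s p => p.2.foldl (fun s kw => PySem.Set.add s (PySem.Str.lower kw)) s)
                PySem.Set.empty).filter (fun k => PySem.Str.isIn k text))
            (PySem.Str.lower kw)))).map (fun p => p.1)) := by
  rw [PySem.List.foldl_append_if (fun q : String × List String => pvBreakLoop text q.2) (fun q => q.1) ck []]
  simp only [List.nil_append]
  congr 1
  apply List.filter_congr
  intro p hp
  rw [pvBreakLoop_eq_any]
  apply PySem.List.any_congr_mem
  intro kw hkw
  have hmem : PySem.Str.lower kw ∈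
      ck.foldl (fun s p => p.2.foldl (fun s kw => PySem.Set.add s (PySem.Str.lower kw)) s) PySem.Set.empty :=
    (pvMem_distinct ck PySem.Set.empty _).mpr (Or.inr ⟨p, hp, kw, hkw, rfl⟩)
  rw [Bool.eq_iff_iff, PySem.Set.contains_iff]
  constructor
  · intro ht; exact List.mem_filter.mpr ⟨hmem, ht⟩
  · intro hm; exact (List.mem_filter.mp hm).2

-- ===== VERDICT (by name: the statement is the Claim_ definition above) =====
theorem find_relevant_symbols_py_spec : Claim_equal_find_relevant_symbols_py := by
  intro article symbols ck _
  unfold Spec_find_relevant_symbols_py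
  simp only [find_relevant_symbols_py, find_relevant_symbols_py_alt]
  exact pvMain _ ck
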